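-- pv_equiv track=rewrite | github.com/MaximShoustin/Workout | workout_planner.py | prioritize_must_use_exercises
-- ===== SOURCE A (Python) =====
-- from typing import Dict, List, Tuple
--
-- def prioritize_must_use_exercises(station_pool: List[Tuple[str, str, str, str, dict, str, bool, int]],
--                                  must_use_equipment: List[str],
--                                  cumulative_station_usage: dict,
--                                  available_inventory: dict) -> List[str]:
--     """
--     Get list of must-use equipment that hasn't been used yet and prioritize exercises that use them.
--
--     Args:
--         station_pool: Available exercises
--         must_use_equipment: List of equipment types that must be used
--         cumulative_station_usage: Equipment already used by completed stations
--         available_inventory: Total equipment inventory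
--
--     Returns:
--         List of unused must-use equipment types
--     """
--     if not must_use_equipment:
--         return []
--
--     unused_must_use = []
--
--     for equipment_type in must_use_equipment:
--         # Check if this equipment type has been used
--         used_count = cumulative_station_usage.get(equipment_type, {}).get("count", 0)
--         available_count = available_inventory.get(equipment_type, {}).get("count", 0)
--
--         # If we have the equipment and haven't used it yet (or haven't fully utilized it), mark as unused
--         if available_count > 0 and used_count < available_count:
--             unused_must_use.append(equipment_type)
--
--     # Sort unused must-use equipment to prioritize the most constrained ones first
--     # plyo_box has the fewest exercises, so it should be tried first
--     priority_order = ["plyo_box", "bench", "dip_parallel_bars", "barbells", "slam_balls_5kg", "dumbbells_3kg", "dumbbells_5kg"]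
--
--     def get_priority(equipment_type):
--         if equipment_type in priority_order:
--             return priority_order.index(equipment_type)
--         return len(priority_order)  # Unknown equipment goes last
--
--     unused_must_use.sort(key=get_priority)
--     return unused_must_use
-- ===== SOURCE B (Python) =====
-- from typing import Dict, List, Tuple
--
-- def prioritize_must_use_exercises(station_pool: List[Tuple[str, str, str, str, dict, str, bool, int]],
--                                  must_use_equipment: List[str],
--                                  cumulative_station_usage: dict,
--                                  available_inventory: dict) -> List[str]:
--     def still_needed(equipment_type):
--         available = available_inventory.get(equipment_type, {}).get("count", 0)
--         used = cumulative_station_usage.get(equipment_type, {}).get("count", 0)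
--         return available > 0 and used < available
--
--     unused = [e for e in must_use_equipment if still_needed(e)]
--
--     priority_order = ["plyo_box", "bench", "dip_parallel_bars", "barbells", "slam_balls_5kg", "dumbbells_3kg", "dumbbells_5kg"]
--
--     # Counting construction instead of a comparison sort.
--     counts = {}
--     for e in unused:
--         counts[e] = counts.get(e, 0) + 1
--     result = []
--     for p in priority_order:
--         result += [p] * counts.get(p, 0)
--     for e in unused:
--         if e not in priority_order:
--             result.append(e)
--     return result
-- ===== Notes on version B (the rewrite author's own statement) =====
-- stated objective: alternative
-- what changed: A's single accumulator loop followed by a stable comparison sort keyed by priority_order.index is replaced by staged passes: a predicate filter, an occurrence-counting dict, emission of each known priority name by its count, then the unknown names in original order - no sort at all.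
import Mathlib
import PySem

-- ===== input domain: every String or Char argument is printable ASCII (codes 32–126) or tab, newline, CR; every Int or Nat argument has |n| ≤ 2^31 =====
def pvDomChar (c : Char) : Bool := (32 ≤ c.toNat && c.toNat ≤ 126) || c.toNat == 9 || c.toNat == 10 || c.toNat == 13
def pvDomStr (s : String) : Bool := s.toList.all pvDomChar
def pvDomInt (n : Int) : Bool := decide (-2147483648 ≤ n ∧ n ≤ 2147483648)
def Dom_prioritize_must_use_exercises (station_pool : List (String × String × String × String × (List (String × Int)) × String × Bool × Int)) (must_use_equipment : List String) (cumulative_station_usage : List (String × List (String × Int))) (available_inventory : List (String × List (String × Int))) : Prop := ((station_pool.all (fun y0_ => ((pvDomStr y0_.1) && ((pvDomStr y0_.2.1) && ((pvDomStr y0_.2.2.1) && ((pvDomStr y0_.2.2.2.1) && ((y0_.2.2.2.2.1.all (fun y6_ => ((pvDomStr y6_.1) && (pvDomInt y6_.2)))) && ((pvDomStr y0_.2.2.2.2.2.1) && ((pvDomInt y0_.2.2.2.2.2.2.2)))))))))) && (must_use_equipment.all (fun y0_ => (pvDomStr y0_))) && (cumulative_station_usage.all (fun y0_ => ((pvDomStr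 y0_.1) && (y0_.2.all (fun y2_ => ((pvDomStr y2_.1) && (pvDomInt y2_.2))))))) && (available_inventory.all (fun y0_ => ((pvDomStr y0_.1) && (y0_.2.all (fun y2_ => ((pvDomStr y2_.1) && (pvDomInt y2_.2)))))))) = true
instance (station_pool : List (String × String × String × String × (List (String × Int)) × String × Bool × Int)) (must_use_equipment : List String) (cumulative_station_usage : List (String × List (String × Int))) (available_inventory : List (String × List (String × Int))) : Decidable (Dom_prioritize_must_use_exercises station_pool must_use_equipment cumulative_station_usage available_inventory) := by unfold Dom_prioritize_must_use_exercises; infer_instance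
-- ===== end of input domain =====

-- B replaces A's accumulator loop + comparison sort by staged passes (predicate
-- filter, occurrence-counting dict, emission by count, unknowns in order); objective: alternative.

-- ===== PORT A =====
-- the priority_order literal both Pythons spell out
def pvPriorityOrder : List String := ["plyo_box", "bench", "dip_parallel_bars", "barbells", "slam_balls_5kg", "dumbbells_3kg", "dumbbells_5kg"]

-- get_priority: priority_order.index(e) if e in priority_order else len(priority_order)
def pvGetPriority (equipment_type : String) : Nat :=
  if pvPriorityOrder.contains equipment_type then
    (PySem.List.index? pvPriorityOrder equipment_type).getD 0
  else pvPriorityOrder.length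

def prioritize_must_use_exercises (station_pool : List (String × String × String × String × (List (String × Int)) × String × Bool × Int)) (must_use_equipment : List String) (cumulative_station_usage : List (String × List (String × Int))) (available_inventory : List (String × List (String × Int))) : List String :=
  if must_use_equipment = [] then []
  else
    let unused_must_use := must_use_equipment.foldl (fun acc equipment_type =>
      let used_count := PySem.Dict.getD (PySem.Dict.mk (PySem.Dict.getD (PySem.Dict.mk cumulative_station_usage) equipment_type [])) "count" 0
      let available_count := PySem.Dict.getD (PySem.Dict.mk (PySem.Dict.getD (PySem.Dict.mk available_inventory) equipment_type [])) "count" 0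
      if 0 < available_count ∧ used_count < available_count then acc ++ [equipment_type] else acc) []
    PySem.List.sorted unused_must_use pvGetPriority false

-- ===== PORT B =====
-- still_needed(e): available > 0 and used < available
def pvStillNeeded (cumulative_station_usage available_inventory : List (String × List (String × Int))) (equipment_type : String) : Bool :=
  let available := PySem.Dict.getD (PySem.Dict.mk (PySem.Dict.getD (PySem.Dict.mk available_inventory) equipment_type [])) "count" 0
  let used := PySem.Dict.getD (PySem.Dict.mk (PySem.Dict.getD (PySem.Dict.mk cumulative_station_usage) equipment_type [])) "count" 0
  decide (0 < available) && decide (used < available)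

def prioritize_must_use_exercises_alt (station_pool : List (String × String × String × String × (List (String × Int)) × String × Bool × Int)) (must_use_equipment : List String) (cumulative_station_usage : List (String × List (String × Int))) (available_inventory : List (String × List (String × Int))) : List String :=
  let unused := must_use_equipment.filter (pvStillNeeded cumulative_station_usage available_inventory)
  let counts := unused.foldl (fun d e => d.insert e (d.getD e 0 + 1)) (PySem.Dict.empty : PySem.Dict String Int)
  let result := pvPriorityOrder.foldl (fun res p => res ++ List.replicate (counts.getD p 0).toNat p) []
  unused.foldl (fun res e => if !(pvPriorityOrder.contains e) then res ++ [e] else res) result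

-- ===== PRECONDITION & SPEC =====
def Spec_prioritize_must_use_exercises (station_pool : List (String × String × String × String × (List (String × Int)) × String × Bool × Int)) (must_use_equipment : List String) (cumulative_station_usage : List (String × List (String × Int))) (available_inventory : List (String × List (String × Int))) (out : List String) : Prop := out = prioritize_must_use_exercises_alt station_pool must_use_equipment cumulative_station_usage available_inventory
instance (station_pool : List (String × String × String × String × (List (String × Int)) × String × Bool × Int)) (must_use_equipment : List String) (cumulative_station_usage : List (String × List (String × Int))) (available_inventory : List (String × List (String × Int))) (out : List String) : Decidable (Spec_prioritize_must_use_exercises station_pool must_use_equipment cumulative_station_usage available_inventory out) := by unfold Spec_prioritize_must_use_exercises; infer_instance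

-- ===== CLAIM (what is proved, stated in full; the proofs are below) =====
def Claim_equal_prioritize_must_use_exercises : Prop := ∀ (station_pool : List (String × String × String × String × (List (String × Int)) × String × Bool × Int)) (must_use_equipment : List String) (cumulative_station_usage : List (String × List (String × Int))) (available_inventory : List (String × List (String × Int))), Dom_prioritize_must_use_exercises station_pool must_use_equipment cumulative_station_usage available_inventory → Spec_prioritize_must_use_exercises station_pool must_use_equipment cumulative_station_usage available_inventory (prioritize_must_use_exercises station_pool must_use_equipment cumulative_station_usage available_inventory)

-- ===== LEMMAS AND PROOFS =====

-- buckets: concatenation of the key-k fibres of xs, for k ranging over range n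
def pvBuckets (key : String → Nat) (n : Nat) (xs : List String) : List String :=
  (List.range n).flatMap (fun k => xs.filter (fun x => key x == k))

lemma insertBy_append_of_forall_before (before : String → String → Bool) (x : String)
    (A C : List String) (hC : ∀ c ∈ C, before x c = true) :
    PySem.List.insertBy before x (A ++ C) = PySem.List.insertBy before x A ++ C := by
  induction A with
  | nil =>
    cases C with
    | nil => simp [PySem.List.insertBy]
    | cons c C' => simp [PySem.List.insertBy, hC c (by simp)]
  | cons a A' ih =>
    by_cases h : before x a
    · simp [PySem.List.insertBy, h]
    · simp [PySem.List.insertBy, h, ih]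

lemma insertBy_append_of_forall_not_before (before : String → String → Bool) (x : String)
    (A C : List String) (hA : ∀ a ∈ A, before x a = false) :
    PySem.List.insertBy before x (A ++ C) = A ++ PySem.List.insertBy before x C := by
  induction A with
  | nil => simp
  | cons a A' ih =>
    have := hA a (by simp)
    simp [PySem.List.insertBy, this, ih (fun a ha => hA a (by simp [ha]))]

lemma mem_pvBuckets_key_lt (key : String → Nat) (n : Nat) (xs : List String)
    (y : String) (hy : y ∈ pvBuckets key n xs) : key y < n := by
  unfold pvBuckets at hy
  simp only [List.mem_flatMap, List.mem_range, List.mem_filter] at hy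
  obtain ⟨k, hk, _, hke⟩ := hy
  have : key y = k := by simpa using hke
  omega

lemma pvBuckets_insert (key : String → Nat) (n : Nat) (x : String) (xs : List String)
    (hx : key x < n) :
    PySem.List.insertBy (fun a b => decide (key a < key b)) x (pvBuckets key n xs)
      = pvBuckets key n (xs ++ [x]) := by
  induction n with
  | zero => omega
  | succ m ih =>
    have hsplit : ∀ ys : List String, pvBuckets key (m+1) ys
        = pvBuckets key m ys ++ ys.filter (fun y => key y == m) := by
      intro ys; unfold pvBuckets; rw [List.range_succ, List.flatMap_append]; simp
    rw [hsplit]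
    by_cases hxm : key x = m
    · rw [insertBy_append_of_forall_not_before]
      · rw [PySem.List.insertBy_of_forall_not_before]
        · rw [hsplit]
          have hb : pvBuckets key m (xs ++ [x]) = pvBuckets key m xs := by
            unfold pvBuckets
            apply List.flatMap_congr
            intro k hk
            simp only [List.mem_range] at hk
            rw [List.filter_append]
            have : ¬ (key x == k) = true := by simp; omega
            simp [this]
          rw [hb]
          simp [List.filter_append, hxm]
        · intro y hy
          simp only [List.mem_filter, Nat.beq_eq_true_eq] at hy
          simp [hxm, hy.2]
      · intro y hy
        have := mem_pvBuckets_key_lt key m xs y hy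
        simp; omega
    · have hxlt : key x < m := by omega
      rw [insertBy_append_of_forall_before]
      · rw [ih hxlt, hsplit, List.filter_append]
        have : ¬ (key x == m) = true := by simp; omega
        simp [this]
      · intro c hc
        simp only [List.mem_filter, Nat.beq_eq_true_eq] at hc
        simp; omega

lemma pvBuckets_foldl (key : String → Nat) (n : Nat) (us : List String)
    (h : ∀ y ∈ us, key y < n) : ∀ xs : List String,
    us.foldl (fun acc x => PySem.List.insertBy (fun a b => decide (key a < key b)) x acc)
      (pvBuckets key n xs) = pvBuckets key n (xs ++ us) := by
  induction us with
  | nil => intro xs; simp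
  | cons u us' ih =>
    intro xs
    simp only [List.foldl_cons]
    rw [pvBuckets_insert key n u xs (h u (by simp))]
    rw [ih (fun y hy => h y (by simp [hy])) (xs ++ [u])]
    simp

lemma sorted_eq_pvBuckets (key : String → Nat) (n : Nat) (us : List String)
    (h : ∀ y ∈ us, key y < n) :
    PySem.List.sorted us key false = pvBuckets key n us := by
  rw [PySem.List.sorted_eq_foldl_insertBy]
  have h0 : pvBuckets key n [] = [] := by
    unfold pvBuckets; simp
  have := pvBuckets_foldl key n us h []
  rw [h0] at this
  simpa using this

lemma pvGetPriority_lt (x : String) : pvGetPriority x < 8 := by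
  unfold pvGetPriority
  split
  · rename_i h
    have hs : (PySem.List.index? pvPriorityOrder x).isSome := by
      rw [PySem.List.index?_isSome_iff]
      simpa [List.contains_iff_mem] using h
    obtain ⟨k, hk⟩ := Option.isSome_iff_exists.mp hs
    obtain ⟨hlt, -, -⟩ := PySem.List.getElem_of_index?_eq_some hk
    simp only [hk, Option.getD_some]
    simpa [pvPriorityOrder] using Nat.lt_succ_of_lt hlt
  · simp [pvPriorityOrder]

-- closed form of get_priority as a chain of string tests
lemma pvGetPriority_eq (x : String) : pvGetPriority x =
    (if x = "plyo_box" then 0 else if x = "bench" then 1 else if x = "dip_parallel_bars" then 2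
     else if x = "barbells" then 3 else if x = "slam_balls_5kg" then 4
     else if x = "dumbbells_3kg" then 5 else if x = "dumbbells_5kg" then 6 else 7) := by
  unfold pvGetPriority pvPriorityOrder
  by_cases h1 : x = "plyo_box"
  · subst h1; decide
  by_cases h2 : x = "bench"
  · subst h2; decide
  by_cases h3 : x = "dip_parallel_bars"
  · subst h3; decide
  by_cases h4 : x = "barbells"
  · subst h4; decide
  by_cases h5 : x = "slam_balls_5kg"
  · subst h5; decide
  by_cases h6 : x = "dumbbells_3kg"
  · subst h6; decide
  by_cases h7 : x = "dumbbells_5kg"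
  · subst h7; decide
  have hc : pvPriorityOrder.contains x = false := by
    simp [pvPriorityOrder, h1, h2, h3, h4, h5, h6, h7]
  simp only [pvPriorityOrder] at hc
  simp [h1, h2, h3, h4, h5, h6, h7]

lemma bucket_filter_eq (us : List String) (k : Nat) (p : String)
    (hp : ∀ x : String, (pvGetPriority x = k ↔ x = p)) :
    us.filter (fun x => pvGetPriority x == k) = List.replicate (List.count p us) p := by
  rw [← List.filter_beq (l := us) p]
  apply List.filter_congr
  intro x _
  simp [hp x]

lemma last_bucket_eq (us : List String) :
    us.filter (fun x => pvGetPriority x == 7) = us.filter (fun e => !pvPriorityOrder.contains e) := by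
  apply List.filter_congr
  intro x _
  rw [pvGetPriority_eq x]
  by_cases h1 : x = "plyo_box" <;> by_cases h2 : x = "bench" <;>
  by_cases h3 : x = "dip_parallel_bars" <;> by_cases h4 : x = "barbells" <;>
  by_cases h5 : x = "slam_balls_5kg" <;> by_cases h6 : x = "dumbbells_3kg" <;>
  by_cases h7 : x = "dumbbells_5kg" <;>
  simp_all [pvPriorityOrder]

lemma sorted_eq_counts (us : List String) :
    PySem.List.sorted us pvGetPriority false
      = (pvPriorityOrder.flatMap (fun p => List.replicate (us.count p) p))
        ++ us.filter (fun e => !pvPriorityOrder.contains e) := by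
  rw [sorted_eq_pvBuckets pvGetPriority 8 us (fun y _ => pvGetPriority_lt y)]
  unfold pvBuckets
  have e0 := bucket_filter_eq us 0 "plyo_box" (by intro x; rw [pvGetPriority_eq]; split_ifs <;> simp_all)
  have e1 := bucket_filter_eq us 1 "bench" (by intro x; rw [pvGetPriority_eq]; split_ifs <;> simp_all)
  have e2 := bucket_filter_eq us 2 "dip_parallel_bars" (by intro x; rw [pvGetPriority_eq]; split_ifs <;> simp_all)
  have e3 := bucket_filter_eq us 3 "barbells" (by intro x; rw [pvGetPriority_eq]; split_ifs <;> simp_all)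
  have e4 := bucket_filter_eq us 4 "slam_balls_5kg" (by intro x; rw [pvGetPriority_eq]; split_ifs <;> simp_all)
  have e5 := bucket_filter_eq us 5 "dumbbells_3kg" (by intro x; rw [pvGetPriority_eq]; split_ifs <;> simp_all)
  have e6 := bucket_filter_eq us 6 "dumbbells_5kg" (by intro x; rw [pvGetPriority_eq]; split_ifs <;> simp_all)
  have e7 := last_bucket_eq us
  show ([0,1,2,3,4,5,6,7] : List Nat).flatMap (fun k => us.filter (fun x => pvGetPriority x == k)) = _
  simp only [List.flatMap_cons, List.flatMap_nil, List.append_nil, e0, e1, e2, e3, e4, e5, e6, e7,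
    pvPriorityOrder, List.append_assoc]

-- A's accumulator loop builds exactly the filter B takes
lemma unused_loop_eq_filter (cum inv : List (String × List (String × Int))) (mu : List String) :
    mu.foldl (fun acc equipment_type =>
      let used_count := PySem.Dict.getD (PySem.Dict.mk (PySem.Dict.getD (PySem.Dict.mk cum) equipment_type [])) "count" 0
      let available_count := PySem.Dict.getD (PySem.Dict.mk (PySem.Dict.getD (PySem.Dict.mk inv) equipment_type [])) "count" 0
      if 0 < available_count ∧ used_count < available_count then acc ++ [equipment_type] else acc) []
    = mu.filter (pvStillNeeded cum inv) := by
  have := PySem.List.foldl_append_ite_eq_filter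
    (p := fun equipment_type =>
      0 < PySem.Dict.getD (PySem.Dict.mk (PySem.Dict.getD (PySem.Dict.mk inv) equipment_type [])) "count" 0 ∧
      PySem.Dict.getD (PySem.Dict.mk (PySem.Dict.getD (PySem.Dict.mk cum) equipment_type [])) "count" 0 <
        PySem.Dict.getD (PySem.Dict.mk (PySem.Dict.getD (PySem.Dict.mk inv) equipment_type [])) "count" 0)
    (l := mu) (acc := [])
  simp only [List.nil_append] at this
  rw [this]
  apply List.filter_congr
  intro x _
  simp [pvStillNeeded]

-- B's counting dict reads back as List.count
lemma counts_getD (us : List String) (p : String) :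
    ((us.foldl (fun d e => d.insert e (d.getD e 0 + 1)) (PySem.Dict.empty : PySem.Dict String Int)).getD p 0).toNat
      = us.count p := by
  rw [PySem.Dict.foldl_insert_getD_add_one_eq_counter, PySem.Dict.getD_counter]
  simp

-- ===== VERDICT (by name: the statement is the Claim_ definition above) =====
theorem prioritize_must_use_exercises_spec : Claim_equal_prioritize_must_use_exercises := by
  intro sp mu cum inv _
  unfold Spec_prioritize_must_use_exercises prioritize_must_use_exercises prioritize_must_use_exercises_alt
  by_cases hmu : mu = []
  · subst hmu; rfl
  · simp only [if_neg hmu]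
    rw [unused_loop_eq_filter]
    rw [sorted_eq_counts]
    rw [PySem.List.foldl_append_if_eq_filter]
    congr 1
    rw [PySem.List.foldl_append_eq_flatMap]
    simp only [List.nil_append]
    apply List.flatMap_congr
    intro p _
    rw [counts_getD]
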